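-- pv_equiv track=rewrite | github.com/DevOpsLink93/FederalBillBot | congress_x/monitor.py | find_introduction_action
-- ===== SOURCE A (Python) =====
-- from typing import List, Dict, Any
--
-- def find_introduction_action(actions: List[Dict[str, Any]]) -> Dict[str, Any]:
--     """
--     Find the bill introduction action from the list of actions.
--     Prioritizes actions with Type: "IntroReferral" and official introduction codes:
--     - House: Code "1000" (numeric), "1025" (resolutions), or "Intro-H" (alphabetic)
--     - Senate: Code "10000" (numeric), "17000" (Senate resolutions), or "Intro-S" (alphabetic)
--     Falls back to any "IntroReferral" action if specific codes aren't found.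
--     Returns the EARLIEST (oldest) matching action to get the actual introduction date.
--
--     Args:
--         actions: List of bill actions
--
--     Returns:
--         Introduction action dictionary or empty dict if not found
--     """
--     # Priority 1: Look for actions with Type="IntroReferral" AND specific introduction codes
--     # Code 17000 is for Senate resolutions (SRES, SJRES, SCONRES)
--     introduction_codes = ["1000", "10000", "1025", "17000", "Intro-H", "Intro-S"]
--     priority_actions = []
--     for action in actions:
--         action_type = action.get("type", "")
--         action_code = action.get("actionCode", "")
--         if action_type == "IntroReferral" and action_code in introduction_codes:
--             priority_actions.append(action)
--
--     # Priority 1b: Also check for Floor actions with code 17000 (Senate resolutions)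
--     if not priority_actions:
--         for action in actions:
--             action_type = action.get("type", "")
--             action_code = action.get("actionCode", "")
--             if action_type == "Floor" and action_code == "17000":
--                 priority_actions.append(action)
--
--     if priority_actions:
--         # Sort by date (oldest first) and return the earliest
--         try:
--             priority_actions.sort(key=lambda x: x.get("actionDate", ""), reverse=False)
--             return priority_actions[0]
--         except:
--             return priority_actions[0]
--
--     # Priority 2: Look for any "IntroReferral" actions
--     intro_referral_actions = []
--     for action in actions:
--         action_type = action.get("type", "")
--         if action_type == "IntroReferral":
--             intro_referral_actions.append(action)
--
--     if intro_referral_actions: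
--         # Sort by date (oldest first) and return the earliest
--         try:
--             intro_referral_actions.sort(key=lambda x: x.get("actionDate", ""), reverse=False)
--             return intro_referral_actions[0]
--         except:
--             return intro_referral_actions[0]
--
--     # Fallback: Look for other introduction-related actions
--     fallback_actions = []
--     introduction_types = ["Introduced", "Introduction"]
--     for action in actions:
--         action_type = action.get("type", "")
--         if action_type in introduction_types:
--             fallback_actions.append(action)
--
--     if fallback_actions:
--         # Sort by date (oldest first) and return the earliest
--         try:
--             fallback_actions.sort(key=lambda x: x.get("actionDate", ""), reverse=False)
--             return fallback_actions[0]
--         except: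
--             return fallback_actions[0]
--
--     # Final fallback: Look for actions that contain introduction-related keywords
--     for action in actions:
--         action_type = action.get("type", "").lower()
--         description = action.get("text", "").lower()
--
--         # Check for introduction-related keywords in type or description
--         intro_keywords = ["intro", "introduced", "introduction", "refer"]
--         if any(keyword in action_type or keyword in description for keyword in intro_keywords):
--             return action
--
--     return {}
-- ===== SOURCE B (Python) =====
-- from typing import List, Dict, Any
--
-- def find_introduction_action(actions: List[Dict[str, Any]]) -> Dict[str, Any]:
--     """Single pass: rank every action (1 best .. 5 worst), keep the candidate
--     minimising (rank, date_key, position); date is ignored for rank 5."""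
--     intro_codes = {"1000", "10000", "1025", "17000", "Intro-H", "Intro-S"}
--     keywords = ("intro", "introduced", "introduction", "refer")
--     best = None  # (key, action)
--     for i, action in enumerate(actions):
--         t = action.get("type", "")
--         code = action.get("actionCode", "")
--         if t == "IntroReferral" and code in intro_codes:
--             rank = 1
--         elif t == "Floor" and code == "17000":
--             rank = 2
--         elif t == "IntroReferral":
--             rank = 3
--         elif t in ("Introduced", "Introduction"):
--             rank = 4
--         else:
--             tl = t.lower()
--             text = action.get("text", "").lower()
--             if any(k in tl or k in text for k in keywords):
--                 rank = 5
--             else: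
--                 continue
--         date = action.get("actionDate", "") if rank < 5 else ""
--         key = (rank, date, i)
--         if best is None or key < best[0]:
--             best = (key, action)
--     return best[1] if best is not None else {}
-- ===== Notes on version B (the rewrite author's own statement) =====
-- stated objective: alternative
-- what changed: A's four separate filter-then-sort-then-take-first passes (plus a final keyword scan) are replaced by a single pass over the actions that assigns each action a priority rank and keeps the candidate minimising the lexicographic key (rank, date, position).
import Mathlib
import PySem

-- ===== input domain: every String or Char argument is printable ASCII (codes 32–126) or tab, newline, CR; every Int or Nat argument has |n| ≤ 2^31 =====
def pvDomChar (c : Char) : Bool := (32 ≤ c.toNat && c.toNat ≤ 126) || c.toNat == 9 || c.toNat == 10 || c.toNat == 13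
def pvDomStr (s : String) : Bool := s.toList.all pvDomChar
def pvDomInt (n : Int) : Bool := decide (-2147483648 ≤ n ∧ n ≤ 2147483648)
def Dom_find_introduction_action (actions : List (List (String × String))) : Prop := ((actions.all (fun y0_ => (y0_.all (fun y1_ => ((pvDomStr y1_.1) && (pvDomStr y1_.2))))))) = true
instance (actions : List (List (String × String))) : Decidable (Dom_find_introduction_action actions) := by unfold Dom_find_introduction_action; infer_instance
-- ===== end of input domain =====

-- B replaces A's four filter-sort-return passes with a single pass that ranks each
-- action and keeps the candidate minimising (rank, date, position); objective: alternative.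

-- shared trivial getter: action.get(k, "") (first-match lookup on the association list)
def pvGet (action : List (String × String)) (k : String) : String :=
  PySem.Dict.getD ⟨action⟩ k ""

-- ===== PORT A =====
-- The Python sort keys here are strings (always comparable), so the `except`
-- branches of A are unreachable and only the `try` path is ported.
-- A's final keyword loop, a literal recursion returning the first match.
def pvFinalLoop : List (List (String × String)) → List (String × String)
  | [] => []
  | action :: rest =>
    let action_type := PySem.Str.lower (pvGet action "type")
    let description := PySem.Str.lower (pvGet action "text")
    if (["intro", "introduced", "introduction", "refer"] : List String).any
        (fun kw => PySem.Str.isIn kw action_type || PySem.Str.isIn kw description)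
    then action else pvFinalLoop rest

def find_introduction_action (actions : List (List (String × String))) : List (String × String) :=
  let introduction_codes : List String := ["1000", "10000", "1025", "17000", "Intro-H", "Intro-S"]
  let priority_actions := actions.foldl (fun acc action =>
    if pvGet action "type" == "IntroReferral" && introduction_codes.contains (pvGet action "actionCode")
    then acc ++ [action] else acc) []
  let priority_actions := if priority_actions.isEmpty then
      actions.foldl (fun acc action =>
        if pvGet action "type" == "Floor" && pvGet action "actionCode" == "17000"
        then acc ++ [action] else acc) []
    else priority_actions
  if !priority_actions.isEmpty then
    (PySem.List.sorted priority_actions (fun x => pvGet x "actionDate") false).headD []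
  else
    let intro_referral_actions := actions.foldl (fun acc action =>
      if pvGet action "type" == "IntroReferral" then acc ++ [action] else acc) []
    if !intro_referral_actions.isEmpty then
      (PySem.List.sorted intro_referral_actions (fun x => pvGet x "actionDate") false).headD []
    else
      let fallback_actions := actions.foldl (fun acc action =>
        if (["Introduced", "Introduction"] : List String).contains (pvGet action "type")
        then acc ++ [action] else acc) []
      if !fallback_actions.isEmpty then
        (PySem.List.sorted fallback_actions (fun x => pvGet x "actionDate") false).headD []
      else
        pvFinalLoop actions

-- ===== PORT B =====
-- the if/elif chain of Source B's loop body (none = continue)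
def pvRank (action : List (String × String)) : Option Int :=
  let t := pvGet action "type"
  let code := pvGet action "actionCode"
  if t == "IntroReferral" && (PySem.Set.ofList ["1000", "10000", "1025", "17000", "Intro-H", "Intro-S"]).contains code then some 1
  else if t == "Floor" && code == "17000" then some 2
  else if t == "IntroReferral" then some 3
  else if t == "Introduced" || t == "Introduction" then some 4
  else if (["intro", "introduced", "introduction", "refer"] : List String).any
      (fun kw => PySem.Str.isIn kw (PySem.Str.lower t) || PySem.Str.isIn kw (PySem.Str.lower (pvGet action "text")))
  then some 5
  else none

-- Python's lexicographic `<` on the (rank, date, index) key triple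
def pvKeyLt (a b : Int × String × Int) : Bool :=
  a.1 < b.1 || (a.1 == b.1 && (a.2.1 < b.2.1 || (a.2.1 == b.2.1 && a.2.2 < b.2.2)))

def find_introduction_action_alt (actions : List (List (String × String))) : List (String × String) :=
  let best := (PySem.List.enumerate actions 0).foldl
    (fun best ia =>
      match pvRank ia.2 with
      | none => best
      | some rank =>
        let date := if rank < 5 then pvGet ia.2 "actionDate" else ""
        let key : Int × String × Int := (rank, date, ia.1)
        match best with
        | none => some (key, ia.2)
        | some b => if pvKeyLt key b.1 then some (key, ia.2) else best)
    none
  match best with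
  | some b => b.2
  | none => []

-- ===== PRECONDITION & SPEC =====
def Spec_find_introduction_action (actions : List (List (String × String))) (out : List (String × String)) : Prop := out = find_introduction_action_alt actions
instance (actions : List (List (String × String))) (out : List (String × String)) : Decidable (Spec_find_introduction_action actions out) := by unfold Spec_find_introduction_action; infer_instance

-- ===== CLAIM (what is proved, stated in full; the proofs are below) =====
def Claim_equal_find_introduction_action : Prop := ∀ (actions : List (List (String × String))), Dom_find_introduction_action actions → Spec_find_introduction_action actions (find_introduction_action actions)

-- ===== LEMMAS AND PROOFS =====

def pvQ1 (a : List (String × String)) : Bool :=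
  pvGet a "type" == "IntroReferral" && (["1000", "10000", "1025", "17000", "Intro-H", "Intro-S"] : List String).contains (pvGet a "actionCode")
def pvQ2 (a : List (String × String)) : Bool :=
  pvGet a "type" == "Floor" && pvGet a "actionCode" == "17000"
def pvQ3 (a : List (String × String)) : Bool :=
  pvGet a "type" == "IntroReferral"
def pvQ4 (a : List (String × String)) : Bool :=
  (["Introduced", "Introduction"] : List String).contains (pvGet a "type")
def pvQ5 (a : List (String × String)) : Bool :=
  (["intro", "introduced", "introduction", "refer"] : List String).any
    (fun kw => PySem.Str.isIn kw (PySem.Str.lower (pvGet a "type")) || PySem.Str.isIn kw (PySem.Str.lower (pvGet a "text")))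
def pvDate (a : List (String × String)) : String := pvGet a "actionDate"
def pvPick (xs : List (List (String × String))) : Option (Int × List (String × String)) :=
  match PySem.List.min? (xs.filter pvQ1) pvDate with
  | some m => some (1, m)
  | none =>
    match PySem.List.min? (xs.filter pvQ2) pvDate with
    | some m => some (2, m)
    | none =>
      match PySem.List.min? (xs.filter pvQ3) pvDate with
      | some m => some (3, m)
      | none =>
        match PySem.List.min? (xs.filter pvQ4) pvDate with
        | some m => some (4, m)
        | none =>
          match xs.find? pvQ5 with
          | some a => some (5, a)
          | none => none
def pvDK (r : Int) (a : List (String × String)) : String := if r < 5 then pvDate a else ""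
theorem pvRank_eq (a : List (String × String)) : pvRank a =
    (if pvQ1 a then some 1 else if pvQ2 a then some 2 else if pvQ3 a then some 3
     else if pvQ4 a then some 4 else if pvQ5 a then some 5 else none) := by
  have h : PySem.Set.ofList (["1000", "10000", "1025", "17000", "Intro-H", "Intro-S"] : List String) = ["1000", "10000", "1025", "17000", "Intro-H", "Intro-S"] :=
    PySem.Set.ofList_eq_self_of_nodup _ (by decide)
  simp [pvRank, pvQ1, pvQ2, pvQ3, pvQ4, pvQ5, h, List.contains_eq_mem]
def pvMin2 (o : Option (List (String × String))) (x : List (String × String)) : List (String × String) :=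
  match o with
  | none => x
  | some m => if pvDate x < pvDate m then x else m
theorem pvMin?_append_singleton (l : List (List (String × String))) (x : List (String × String)) :
    PySem.List.min? (l ++ [x]) pvDate = some (pvMin2 (PySem.List.min? l pvDate) x) := by
  unfold PySem.List.min?
  rw [List.foldl_append]
  simp only [List.foldl_cons, List.foldl_nil]
  split
  · next heq =>
      rw [heq]
      rfl
  · next m heq =>
      rw [heq]
      simp only [pvMin2]
      split_ifs with h1 <;> rfl
theorem pvEnumerate_append {α : Type} (xs : List α) (x : α) (s : Int) :
    PySem.List.enumerate (xs ++ [x]) s = PySem.List.enumerate xs s ++ [(s + xs.length, x)] := by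
  induction xs generalizing s with
  | nil => simp [PySem.List.enumerate]
  | cons y ys ih =>
    simp [PySem.List.enumerate, ih (s+1)]
    omega
def pvStep (best : Option ((Int × String × Int) × List (String × String)))
    (ia : Int × List (String × String)) : Option ((Int × String × Int) × List (String × String)) :=
  match pvRank ia.2 with
  | none => best
  | some rank =>
    let date := if rank < 5 then pvGet ia.2 "actionDate" else ""
    let key : Int × String × Int := (rank, date, ia.1)
    match best with
    | none => some (key, ia.2)
    | some b => if pvKeyLt key b.1 then some (key, ia.2) else best
def pvBFold (xs : List (List (String × String))) :
    Option ((Int × String × Int) × List (String × String)) :=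
  (PySem.List.enumerate xs 0).foldl pvStep none
theorem pvBFold_append (xs : List (List (String × String))) (x : List (String × String)) :
    pvBFold (xs ++ [x]) = pvStep (pvBFold xs) ((xs.length : Int), x) := by
  unfold pvBFold
  rw [pvEnumerate_append, List.foldl_append]
  simp
theorem pvTier_append (q : List (String × String) → Bool) (xs : List (List (String × String))) (x : List (String × String)) :
    PySem.List.min? ((xs ++ [x]).filter q) pvDate =
      (if q x then some (pvMin2 (PySem.List.min? (xs.filter q) pvDate) x)
       else PySem.List.min? (xs.filter q) pvDate) := by
  rw [List.filter_append]
  by_cases h : q x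
  · simp only [h, List.filter_cons, List.filter_nil, if_true]
    rw [pvMin?_append_singleton]
  · simp [h]
def pvRel (n : Nat) (o : Option ((Int × String × Int) × List (String × String)))
    (p : Option (Int × List (String × String))) : Prop :=
  match p with
  | none => o = none
  | some ra => ∃ i : Int, 0 ≤ i ∧ i < (n : Int) ∧ o = some ((ra.1, pvDK ra.1 ra.2, i), ra.2)

theorem pvRel_mono {n : Nat} {o p} (h : pvRel n o p) : pvRel (n + 1) o p := by
  unfold pvRel at *
  cases p with
  | none => exact h
  | some ra =>
    obtain ⟨i, h0, h1, h2⟩ := h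
    exact ⟨i, h0, by push_cast; omega, h2⟩

theorem pvPick_none {xs : List (List (String × String))} (h : pvPick xs = none) :
    PySem.List.min? (xs.filter pvQ1) pvDate = none ∧ PySem.List.min? (xs.filter pvQ2) pvDate = none ∧
    PySem.List.min? (xs.filter pvQ3) pvDate = none ∧ PySem.List.min? (xs.filter pvQ4) pvDate = none ∧
    xs.find? pvQ5 = none := by
  unfold pvPick at h
  split at h
  · simp at h
  next hm1 =>
    split at h
    · simp at h
    next hm2 =>
      split at h
      · simp at h
      next hm3 =>
        split at h
        · simp at h
        next hm4 =>
          split at h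
          · simp at h
          next hm5 => exact ⟨hm1, hm2, hm3, hm4, hm5⟩

theorem pvPick_inv {xs : List (List (String × String))} {r : Int} {a : List (String × String)}
    (h : pvPick xs = some (r, a)) :
    (r = 1 ∧ PySem.List.min? (xs.filter pvQ1) pvDate = some a) ∨
    (r = 2 ∧ PySem.List.min? (xs.filter pvQ1) pvDate = none ∧ PySem.List.min? (xs.filter pvQ2) pvDate = some a) ∨
    (r = 3 ∧ PySem.List.min? (xs.filter pvQ1) pvDate = none ∧ PySem.List.min? (xs.filter pvQ2) pvDate = none ∧
      PySem.List.min? (xs.filter pvQ3) pvDate = some a) ∨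
    (r = 4 ∧ PySem.List.min? (xs.filter pvQ1) pvDate = none ∧ PySem.List.min? (xs.filter pvQ2) pvDate = none ∧
      PySem.List.min? (xs.filter pvQ3) pvDate = none ∧ PySem.List.min? (xs.filter pvQ4) pvDate = some a) ∨
    (r = 5 ∧ PySem.List.min? (xs.filter pvQ1) pvDate = none ∧ PySem.List.min? (xs.filter pvQ2) pvDate = none ∧
      PySem.List.min? (xs.filter pvQ3) pvDate = none ∧ PySem.List.min? (xs.filter pvQ4) pvDate = none ∧
      xs.find? pvQ5 = some a) := by
  unfold pvPick at h
  split at h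
  next m hm1 =>
    obtain ⟨h1, h2⟩ := Prod.mk.injEq .. ▸ (Option.some.injEq .. ▸ h :)
    exact Or.inl ⟨h1.symm, h2 ▸ hm1⟩
  next hm1 =>
    split at h
    next m hm2 =>
      obtain ⟨h1, h2⟩ := Prod.mk.injEq .. ▸ (Option.some.injEq .. ▸ h :)
      exact Or.inr (Or.inl ⟨h1.symm, hm1, h2 ▸ hm2⟩)
    next hm2 =>
      split at h
      next m hm3 =>
        obtain ⟨h1, h2⟩ := Prod.mk.injEq .. ▸ (Option.some.injEq .. ▸ h :)
        exact Or.inr (Or.inr (Or.inl ⟨h1.symm, hm1, hm2, h2 ▸ hm3⟩))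
      next hm3 =>
        split at h
        next m hm4 =>
          obtain ⟨h1, h2⟩ := Prod.mk.injEq .. ▸ (Option.some.injEq .. ▸ h :)
          exact Or.inr (Or.inr (Or.inr (Or.inl ⟨h1.symm, hm1, hm2, hm3, h2 ▸ hm4⟩)))
        next hm4 =>
          split at h
          next m hm5 =>
            obtain ⟨h1, h2⟩ := Prod.mk.injEq .. ▸ (Option.some.injEq .. ▸ h :)
            exact Or.inr (Or.inr (Or.inr (Or.inr ⟨h1.symm, hm1, hm2, hm3, hm4, h2 ▸ hm5⟩)))
          next hm5 => simp at h

theorem pvMain (xs : List (List (String × String))) :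
    pvRel xs.length (pvBFold xs) (pvPick xs) := by
  induction xs using List.reverseRecOn with
  | nil => simp [pvBFold, pvPick, PySem.List.enumerate, PySem.List.min?, pvRel]
  | append_singleton xs x ih =>
    rw [pvBFold_append]
    have hrk := pvRank_eq x
    have hlen : (xs ++ [x]).length = xs.length + 1 := by simp
    by_cases h1 : pvQ1 x
    · -- rank 1
      have hr : pvRank x = some 1 := by rw [hrk]; simp [h1]
      cases hP : pvPick xs with
      | none =>
        rw [hP] at ih
        obtain ⟨hm1, hm2, hm3, hm4, hm5⟩ := pvPick_none hP
        have hP' : pvPick (xs ++ [x]) = some (1, x) := by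
          unfold pvPick
          rw [pvTier_append pvQ1 xs x]
          simp [h1, hm1, pvMin2]
        rw [hP', ih]
        unfold pvStep
        rw [hr]
        exact ⟨xs.length, by omega, by push_cast; omega, by simp [pvDK, pvDate]⟩
      | some ra =>
        obtain ⟨r, a⟩ := ra
        rw [hP] at ih
        obtain ⟨i, hi0, hi1, hB⟩ := ih
        rcases pvPick_inv hP with ⟨hk, hm1⟩ | ⟨hk, hm1, hm2⟩ | ⟨hk, hm1, hm2, hm3⟩ |
          ⟨hk, hm1, hm2, hm3, hm4⟩ | ⟨hk, hm1, hm2, hm3, hm4, hm5⟩ <;> subst hk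
        · -- old rank 1: date duel
          have hP' : pvPick (xs ++ [x]) = some (1, pvMin2 (some a) x) := by
            unfold pvPick
            rw [pvTier_append pvQ1 xs x]
            simp [h1, hm1]
          rw [hP', hB]
          unfold pvStep
          rw [hr]
          have hni : ¬ ((xs.length : Int) < i) := by omega
          simp only [pvKeyLt, pvDK, pvMin2]
          by_cases hd : pvDate x < pvDate a
          · simp only [pvDate] at hd ⊢
            simp [hd, hni]
            exact ⟨xs.length, by omega, by push_cast; omega, by simp [pvDK, pvDate]⟩
          · simp only [pvDate] at hd ⊢
            simp [hd, hni]
            exact ⟨i, hi0, by push_cast; omega, by simp [pvDK, pvDate]⟩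
        · -- old rank 2, new rank 1 wins
          have hP' : pvPick (xs ++ [x]) = some (1, x) := by
            unfold pvPick
            rw [pvTier_append pvQ1 xs x]
            simp [h1, hm1, pvMin2]
          rw [hP', hB]
          unfold pvStep
          rw [hr]
          simp [pvKeyLt]
          exact ⟨xs.length, by omega, by push_cast; omega, by simp [pvDK, pvDate]⟩
        · have hP' : pvPick (xs ++ [x]) = some (1, x) := by
            unfold pvPick
            rw [pvTier_append pvQ1 xs x]
            simp [h1, hm1, pvMin2]
          rw [hP', hB]
          unfold pvStep
          rw [hr]
          simp [pvKeyLt]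
          exact ⟨xs.length, by omega, by push_cast; omega, by simp [pvDK, pvDate]⟩
        · have hP' : pvPick (xs ++ [x]) = some (1, x) := by
            unfold pvPick
            rw [pvTier_append pvQ1 xs x]
            simp [h1, hm1, pvMin2]
          rw [hP', hB]
          unfold pvStep
          rw [hr]
          simp [pvKeyLt]
          exact ⟨xs.length, by omega, by push_cast; omega, by simp [pvDK, pvDate]⟩
        · have hP' : pvPick (xs ++ [x]) = some (1, x) := by
            unfold pvPick
            rw [pvTier_append pvQ1 xs x]
            simp [h1, hm1, pvMin2]
          rw [hP', hB]
          unfold pvStep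
          rw [hr]
          simp [pvKeyLt]
          exact ⟨xs.length, by omega, by push_cast; omega, by simp [pvDK, pvDate]⟩
    by_cases h2 : pvQ2 x
    · -- rank 2
      have hr : pvRank x = some 2 := by rw [hrk]; simp [h1, h2]
      cases hP : pvPick xs with
      | none =>
        rw [hP] at ih
        obtain ⟨hm1, hm2, hm3, hm4, hm5⟩ := pvPick_none hP
        have hP' : pvPick (xs ++ [x]) = some (2, x) := by
          unfold pvPick
          rw [pvTier_append pvQ1 xs x, pvTier_append pvQ2 xs x, pvTier_append pvQ3 xs x, pvTier_append pvQ4 xs x, List.find?_append]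
          simp [h1, h2, hm1, hm2, hm3, hm4, hm5, pvMin2]
        rw [hP', ih]
        unfold pvStep
        rw [hr]
        exact ⟨xs.length, by omega, by push_cast; omega, by simp [pvDK, pvDate]⟩
      | some ra =>
        obtain ⟨r, a⟩ := ra
        rw [hP] at ih
        obtain ⟨i, hi0, hi1, hB⟩ := ih
        rcases pvPick_inv hP with ⟨hk, hm1⟩ | ⟨hk, hm1, hm2⟩ | ⟨hk, hm1, hm2, hm3⟩ |
          ⟨hk, hm1, hm2, hm3, hm4⟩ | ⟨hk, hm1, hm2, hm3, hm4, hm5⟩ <;> subst hk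
        · -- old rank 1 kept
          have hP' : pvPick (xs ++ [x]) = some (1, a) := by
            unfold pvPick
            rw [pvTier_append pvQ1 xs x, pvTier_append pvQ2 xs x, pvTier_append pvQ3 xs x, pvTier_append pvQ4 xs x, List.find?_append]
            simp [h1, h2, hm1]
          rw [hP', hB]
          unfold pvStep
          rw [hr]
          have hni : ¬ ((xs.length : Int) < i) := by omega
          simp [pvKeyLt, pvDK, hni]
          exact ⟨i, hi0, by push_cast; omega, by simp [pvDK, pvDate]⟩
        · -- both rank 2: date duel
          have hP' : pvPick (xs ++ [x]) = some (2, pvMin2 (some a) x) := by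
            unfold pvPick
            rw [pvTier_append pvQ1 xs x, pvTier_append pvQ2 xs x, pvTier_append pvQ3 xs x, pvTier_append pvQ4 xs x, List.find?_append]
            simp [h1, h2, hm1, hm2]
          rw [hP', hB]
          unfold pvStep
          rw [hr]
          have hni : ¬ ((xs.length : Int) < i) := by omega
          simp only [pvKeyLt, pvDK, pvMin2]
          by_cases hd : pvDate x < pvDate a
          · simp only [pvDate] at hd ⊢
            simp [hd, hni]
            exact ⟨xs.length, by omega, by push_cast; omega, by simp [pvDK, pvDate]⟩
          · simp only [pvDate] at hd ⊢
            simp [hd, hni]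
            exact ⟨i, hi0, by push_cast; omega, by simp [pvDK, pvDate]⟩
        · -- new rank 2 beats old rank 3
          have hP' : pvPick (xs ++ [x]) = some (2, x) := by
            unfold pvPick
            rw [pvTier_append pvQ1 xs x, pvTier_append pvQ2 xs x, pvTier_append pvQ3 xs x, pvTier_append pvQ4 xs x, List.find?_append]
            simp [h1, h2, hm1, hm2, hm3, pvMin2]
          rw [hP', hB]
          unfold pvStep
          rw [hr]
          simp [pvKeyLt]
          exact ⟨xs.length, by omega, by push_cast; omega, by simp [pvDK, pvDate]⟩
        · -- new rank 2 beats old rank 4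
          have hP' : pvPick (xs ++ [x]) = some (2, x) := by
            unfold pvPick
            rw [pvTier_append pvQ1 xs x, pvTier_append pvQ2 xs x, pvTier_append pvQ3 xs x, pvTier_append pvQ4 xs x, List.find?_append]
            simp [h1, h2, hm1, hm2, hm3, hm4, pvMin2]
          rw [hP', hB]
          unfold pvStep
          rw [hr]
          simp [pvKeyLt]
          exact ⟨xs.length, by omega, by push_cast; omega, by simp [pvDK, pvDate]⟩
        · -- new rank 2 beats old rank 5
          have hP' : pvPick (xs ++ [x]) = some (2, x) := by
            unfold pvPick
            rw [pvTier_append pvQ1 xs x, pvTier_append pvQ2 xs x, pvTier_append pvQ3 xs x, pvTier_append pvQ4 xs x, List.find?_append]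
            simp [h1, h2, hm1, hm2, hm3, hm4, hm5, pvMin2]
          rw [hP', hB]
          unfold pvStep
          rw [hr]
          simp [pvKeyLt]
          exact ⟨xs.length, by omega, by push_cast; omega, by simp [pvDK, pvDate]⟩
    by_cases h3 : pvQ3 x
    · -- rank 3
      have hr : pvRank x = some 3 := by rw [hrk]; simp [h1, h2, h3]
      cases hP : pvPick xs with
      | none =>
        rw [hP] at ih
        obtain ⟨hm1, hm2, hm3, hm4, hm5⟩ := pvPick_none hP
        have hP' : pvPick (xs ++ [x]) = some (3, x) := by
          unfold pvPick
          rw [pvTier_append pvQ1 xs x, pvTier_append pvQ2 xs x, pvTier_append pvQ3 xs x, pvTier_append pvQ4 xs x, List.find?_append]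
          simp [h1, h2, h3, hm1, hm2, hm3, hm4, hm5, pvMin2]
        rw [hP', ih]
        unfold pvStep
        rw [hr]
        exact ⟨xs.length, by omega, by push_cast; omega, by simp [pvDK, pvDate]⟩
      | some ra =>
        obtain ⟨r, a⟩ := ra
        rw [hP] at ih
        obtain ⟨i, hi0, hi1, hB⟩ := ih
        rcases pvPick_inv hP with ⟨hk, hm1⟩ | ⟨hk, hm1, hm2⟩ | ⟨hk, hm1, hm2, hm3⟩ |
          ⟨hk, hm1, hm2, hm3, hm4⟩ | ⟨hk, hm1, hm2, hm3, hm4, hm5⟩ <;> subst hk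
        · -- old rank 1 kept
          have hP' : pvPick (xs ++ [x]) = some (1, a) := by
            unfold pvPick
            rw [pvTier_append pvQ1 xs x, pvTier_append pvQ2 xs x, pvTier_append pvQ3 xs x, pvTier_append pvQ4 xs x, List.find?_append]
            simp [h1, h2, h3, hm1]
          rw [hP', hB]
          unfold pvStep
          rw [hr]
          have hni : ¬ ((xs.length : Int) < i) := by omega
          simp [pvKeyLt, pvDK, hni]
          exact ⟨i, hi0, by push_cast; omega, by simp [pvDK, pvDate]⟩
        · -- old rank 2 kept
          have hP' : pvPick (xs ++ [x]) = some (2, a) := by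
            unfold pvPick
            rw [pvTier_append pvQ1 xs x, pvTier_append pvQ2 xs x, pvTier_append pvQ3 xs x, pvTier_append pvQ4 xs x, List.find?_append]
            simp [h1, h2, h3, hm1, hm2]
          rw [hP', hB]
          unfold pvStep
          rw [hr]
          have hni : ¬ ((xs.length : Int) < i) := by omega
          simp [pvKeyLt, pvDK, hni]
          exact ⟨i, hi0, by push_cast; omega, by simp [pvDK, pvDate]⟩
        · -- both rank 3: date duel
          have hP' : pvPick (xs ++ [x]) = some (3, pvMin2 (some a) x) := by
            unfold pvPick
            rw [pvTier_append pvQ1 xs x, pvTier_append pvQ2 xs x, pvTier_append pvQ3 xs x, pvTier_append pvQ4 xs x, List.find?_append]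
            simp [h1, h2, h3, hm1, hm2, hm3]
          rw [hP', hB]
          unfold pvStep
          rw [hr]
          have hni : ¬ ((xs.length : Int) < i) := by omega
          simp only [pvKeyLt, pvDK, pvMin2]
          by_cases hd : pvDate x < pvDate a
          · simp only [pvDate] at hd ⊢
            simp [hd, hni]
            exact ⟨xs.length, by omega, by push_cast; omega, by simp [pvDK, pvDate]⟩
          · simp only [pvDate] at hd ⊢
            simp [hd, hni]
            exact ⟨i, hi0, by push_cast; omega, by simp [pvDK, pvDate]⟩
        · -- new rank 3 beats old rank 4
          have hP' : pvPick (xs ++ [x]) = some (3, x) := by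
            unfold pvPick
            rw [pvTier_append pvQ1 xs x, pvTier_append pvQ2 xs x, pvTier_append pvQ3 xs x, pvTier_append pvQ4 xs x, List.find?_append]
            simp [h1, h2, h3, hm1, hm2, hm3, hm4, pvMin2]
          rw [hP', hB]
          unfold pvStep
          rw [hr]
          simp [pvKeyLt]
          exact ⟨xs.length, by omega, by push_cast; omega, by simp [pvDK, pvDate]⟩
        · -- new rank 3 beats old rank 5
          have hP' : pvPick (xs ++ [x]) = some (3, x) := by
            unfold pvPick
            rw [pvTier_append pvQ1 xs x, pvTier_append pvQ2 xs x, pvTier_append pvQ3 xs x, pvTier_append pvQ4 xs x, List.find?_append]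
            simp [h1, h2, h3, hm1, hm2, hm3, hm4, hm5, pvMin2]
          rw [hP', hB]
          unfold pvStep
          rw [hr]
          simp [pvKeyLt]
          exact ⟨xs.length, by omega, by push_cast; omega, by simp [pvDK, pvDate]⟩
    by_cases h4 : pvQ4 x
    · -- rank 4
      have hr : pvRank x = some 4 := by rw [hrk]; simp [h1, h2, h3, h4]
      cases hP : pvPick xs with
      | none =>
        rw [hP] at ih
        obtain ⟨hm1, hm2, hm3, hm4, hm5⟩ := pvPick_none hP
        have hP' : pvPick (xs ++ [x]) = some (4, x) := by
          unfold pvPick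
          rw [pvTier_append pvQ1 xs x, pvTier_append pvQ2 xs x, pvTier_append pvQ3 xs x, pvTier_append pvQ4 xs x, List.find?_append]
          simp [h1, h2, h3, h4, hm1, hm2, hm3, hm4, hm5, pvMin2]
        rw [hP', ih]
        unfold pvStep
        rw [hr]
        exact ⟨xs.length, by omega, by push_cast; omega, by simp [pvDK, pvDate]⟩
      | some ra =>
        obtain ⟨r, a⟩ := ra
        rw [hP] at ih
        obtain ⟨i, hi0, hi1, hB⟩ := ih
        rcases pvPick_inv hP with ⟨hk, hm1⟩ | ⟨hk, hm1, hm2⟩ | ⟨hk, hm1, hm2, hm3⟩ |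
          ⟨hk, hm1, hm2, hm3, hm4⟩ | ⟨hk, hm1, hm2, hm3, hm4, hm5⟩ <;> subst hk
        · -- old rank 1 kept
          have hP' : pvPick (xs ++ [x]) = some (1, a) := by
            unfold pvPick
            rw [pvTier_append pvQ1 xs x, pvTier_append pvQ2 xs x, pvTier_append pvQ3 xs x, pvTier_append pvQ4 xs x, List.find?_append]
            simp [h1, h2, h3, h4, hm1]
          rw [hP', hB]
          unfold pvStep
          rw [hr]
          have hni : ¬ ((xs.length : Int) < i) := by omega
          simp [pvKeyLt, pvDK, hni]
          exact ⟨i, hi0, by push_cast; omega, by simp [pvDK, pvDate]⟩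
        · -- old rank 2 kept
          have hP' : pvPick (xs ++ [x]) = some (2, a) := by
            unfold pvPick
            rw [pvTier_append pvQ1 xs x, pvTier_append pvQ2 xs x, pvTier_append pvQ3 xs x, pvTier_append pvQ4 xs x, List.find?_append]
            simp [h1, h2, h3, h4, hm1, hm2]
          rw [hP', hB]
          unfold pvStep
          rw [hr]
          have hni : ¬ ((xs.length : Int) < i) := by omega
          simp [pvKeyLt, pvDK, hni]
          exact ⟨i, hi0, by push_cast; omega, by simp [pvDK, pvDate]⟩
        · -- old rank 3 kept
          have hP' : pvPick (xs ++ [x]) = some (3, a) := by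
            unfold pvPick
            rw [pvTier_append pvQ1 xs x, pvTier_append pvQ2 xs x, pvTier_append pvQ3 xs x, pvTier_append pvQ4 xs x, List.find?_append]
            simp [h1, h2, h3, h4, hm1, hm2, hm3]
          rw [hP', hB]
          unfold pvStep
          rw [hr]
          have hni : ¬ ((xs.length : Int) < i) := by omega
          simp [pvKeyLt, pvDK, hni]
          exact ⟨i, hi0, by push_cast; omega, by simp [pvDK, pvDate]⟩
        · -- both rank 4: date duel
          have hP' : pvPick (xs ++ [x]) = some (4, pvMin2 (some a) x) := by
            unfold pvPick
            rw [pvTier_append pvQ1 xs x, pvTier_append pvQ2 xs x, pvTier_append pvQ3 xs x, pvTier_append pvQ4 xs x, List.find?_append]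
            simp [h1, h2, h3, h4, hm1, hm2, hm3, hm4]
          rw [hP', hB]
          unfold pvStep
          rw [hr]
          have hni : ¬ ((xs.length : Int) < i) := by omega
          simp only [pvKeyLt, pvDK, pvMin2]
          by_cases hd : pvDate x < pvDate a
          · simp only [pvDate] at hd ⊢
            simp [hd, hni]
            exact ⟨xs.length, by omega, by push_cast; omega, by simp [pvDK, pvDate]⟩
          · simp only [pvDate] at hd ⊢
            simp [hd, hni]
            exact ⟨i, hi0, by push_cast; omega, by simp [pvDK, pvDate]⟩
        · -- new rank 4 beats old rank 5
          have hP' : pvPick (xs ++ [x]) = some (4, x) := by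
            unfold pvPick
            rw [pvTier_append pvQ1 xs x, pvTier_append pvQ2 xs x, pvTier_append pvQ3 xs x, pvTier_append pvQ4 xs x, List.find?_append]
            simp [h1, h2, h3, h4, hm1, hm2, hm3, hm4, hm5, pvMin2]
          rw [hP', hB]
          unfold pvStep
          rw [hr]
          simp [pvKeyLt]
          exact ⟨xs.length, by omega, by push_cast; omega, by simp [pvDK, pvDate]⟩
    by_cases h5 : pvQ5 x
    · -- rank 5
      have hr : pvRank x = some 5 := by rw [hrk]; simp [h1, h2, h3, h4, h5]
      cases hP : pvPick xs with
      | none =>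
        rw [hP] at ih
        obtain ⟨hm1, hm2, hm3, hm4, hm5⟩ := pvPick_none hP
        have hP' : pvPick (xs ++ [x]) = some (5, x) := by
          unfold pvPick
          rw [pvTier_append pvQ1 xs x, pvTier_append pvQ2 xs x, pvTier_append pvQ3 xs x, pvTier_append pvQ4 xs x, List.find?_append]
          simp [h1, h2, h3, h4, h5, hm1, hm2, hm3, hm4, hm5, pvMin2]
        rw [hP', ih]
        unfold pvStep
        rw [hr]
        exact ⟨xs.length, by omega, by push_cast; omega, by simp [pvDK, pvDate]⟩
      | some ra =>
        obtain ⟨r, a⟩ := ra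
        rw [hP] at ih
        obtain ⟨i, hi0, hi1, hB⟩ := ih
        rcases pvPick_inv hP with ⟨hk, hm1⟩ | ⟨hk, hm1, hm2⟩ | ⟨hk, hm1, hm2, hm3⟩ |
          ⟨hk, hm1, hm2, hm3, hm4⟩ | ⟨hk, hm1, hm2, hm3, hm4, hm5⟩ <;> subst hk
        · -- old rank 1 kept
          have hP' : pvPick (xs ++ [x]) = some (1, a) := by
            unfold pvPick
            rw [pvTier_append pvQ1 xs x, pvTier_append pvQ2 xs x, pvTier_append pvQ3 xs x, pvTier_append pvQ4 xs x, List.find?_append]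
            simp [h1, h2, h3, h4, h5, hm1]
          rw [hP', hB]
          unfold pvStep
          rw [hr]
          have hni : ¬ ((xs.length : Int) < i) := by omega
          simp [pvKeyLt, pvDK, hni]
          exact ⟨i, hi0, by push_cast; omega, by simp [pvDK, pvDate]⟩
        · -- old rank 2 kept
          have hP' : pvPick (xs ++ [x]) = some (2, a) := by
            unfold pvPick
            rw [pvTier_append pvQ1 xs x, pvTier_append pvQ2 xs x, pvTier_append pvQ3 xs x, pvTier_append pvQ4 xs x, List.find?_append]
            simp [h1, h2, h3, h4, h5, hm1, hm2]
          rw [hP', hB]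
          unfold pvStep
          rw [hr]
          have hni : ¬ ((xs.length : Int) < i) := by omega
          simp [pvKeyLt, pvDK, hni]
          exact ⟨i, hi0, by push_cast; omega, by simp [pvDK, pvDate]⟩
        · -- old rank 3 kept
          have hP' : pvPick (xs ++ [x]) = some (3, a) := by
            unfold pvPick
            rw [pvTier_append pvQ1 xs x, pvTier_append pvQ2 xs x, pvTier_append pvQ3 xs x, pvTier_append pvQ4 xs x, List.find?_append]
            simp [h1, h2, h3, h4, h5, hm1, hm2, hm3]
          rw [hP', hB]
          unfold pvStep
          rw [hr]
          have hni : ¬ ((xs.length : Int) < i) := by omega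
          simp [pvKeyLt, pvDK, hni]
          exact ⟨i, hi0, by push_cast; omega, by simp [pvDK, pvDate]⟩
        · -- old rank 4 kept
          have hP' : pvPick (xs ++ [x]) = some (4, a) := by
            unfold pvPick
            rw [pvTier_append pvQ1 xs x, pvTier_append pvQ2 xs x, pvTier_append pvQ3 xs x, pvTier_append pvQ4 xs x, List.find?_append]
            simp [h1, h2, h3, h4, h5, hm1, hm2, hm3, hm4]
          rw [hP', hB]
          unfold pvStep
          rw [hr]
          have hni : ¬ ((xs.length : Int) < i) := by omega
          simp [pvKeyLt, pvDK, hni]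
          exact ⟨i, hi0, by push_cast; omega, by simp [pvDK, pvDate]⟩
        · -- both rank 5: first occurrence kept
          have hP' : pvPick (xs ++ [x]) = some (5, a) := by
            unfold pvPick
            rw [pvTier_append pvQ1 xs x, pvTier_append pvQ2 xs x, pvTier_append pvQ3 xs x, pvTier_append pvQ4 xs x, List.find?_append]
            simp [h1, h2, h3, h4, h5, hm1, hm2, hm3, hm4, hm5]
          rw [hP', hB]
          unfold pvStep
          rw [hr]
          have hni : ¬ ((xs.length : Int) < i) := by omega
          simp [pvKeyLt, pvDK, hni]
          exact ⟨i, hi0, by push_cast; omega, by simp [pvDK, pvDate]⟩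
    · -- no rank: x is skipped
      have hr : pvRank x = none := by rw [hrk]; simp [h1, h2, h3, h4, h5]
      have hP' : pvPick (xs ++ [x]) = pvPick xs := by
        unfold pvPick
        rw [pvTier_append pvQ1 xs x, pvTier_append pvQ2 xs x, pvTier_append pvQ3 xs x, pvTier_append pvQ4 xs x, List.find?_append]
        simp [h1, h2, h3, h4, h5]
      rw [hP']
      unfold pvStep
      rw [hr, hlen]
      exact pvRel_mono ih

theorem pvFinalLoop_eq (xs : List (List (String × String))) :
    pvFinalLoop xs = (xs.find? pvQ5).getD [] := by
  induction xs with
  | nil => rfl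
  | cons a rest ih =>
    rw [List.find?_cons]
    show (if pvQ5 a then a else pvFinalLoop rest) = _
    cases h : pvQ5 a
    · rw [if_neg (by simp [h]), ih]
    · rw [if_pos (by simp [h])]
      rfl

theorem pvSortedHead (l : List (List (String × String))) :
    (PySem.List.sorted l pvDate false).head? = PySem.List.min? l pvDate := by
  induction l using List.reverseRecOn with
  | nil => rfl
  | append_singleton l x ih =>
    have hs : PySem.List.sorted (l ++ [x]) pvDate false =
        PySem.List.insertBy (fun a b => decide (pvDate a < pvDate b)) x (PySem.List.sorted l pvDate false) := by
      rw [PySem.List.sorted_eq_foldl_insertBy, PySem.List.sorted_eq_foldl_insertBy, List.foldl_append]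
      simp only [List.foldl_cons, List.foldl_nil]
    rw [hs, pvMin?_append_singleton, ← ih]
    cases hS : (PySem.List.sorted l pvDate false) with
    | nil => simp [PySem.List.insertBy, pvMin2]
    | cons y ys =>
      by_cases hlt : pvDate x < pvDate y
      · simp [PySem.List.insertBy, hlt, pvMin2]
      · simp [PySem.List.insertBy, hlt, pvMin2]

theorem pvB_eq_pick (xs : List (List (String × String))) :
    find_introduction_action_alt xs = (match pvPick xs with | some p => p.2 | none => []) := by
  have hB : find_introduction_action_alt xs =
      (match pvBFold xs with | some b => b.2 | none => []) := rfl
  rw [hB]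
  have h := pvMain xs
  cases hP : pvPick xs with
  | none =>
    rw [hP] at h
    have h' : pvBFold xs = none := h
    rw [h']
  | some ra =>
    rw [hP] at h
    obtain ⟨i, _, _, hBf⟩ := h
    rw [hBf]

theorem pvA_eq_pick (xs : List (List (String × String))) :
    find_introduction_action xs = (match pvPick xs with | some p => p.2 | none => []) := by
  unfold find_introduction_action
  simp only []
  rw [show (fun (acc : List (List (String × String))) (action : List (String × String)) =>
        if pvGet action "type" == "IntroReferral" && (["1000", "10000", "1025", "17000", "Intro-H", "Intro-S"] : List String).contains (pvGet action "actionCode")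
        then acc ++ [action] else acc) = (fun acc action => if pvQ1 action = true then acc ++ [action] else acc) from rfl,
      show (fun (acc : List (List (String × String))) (action : List (String × String)) =>
        if pvGet action "type" == "Floor" && pvGet action "actionCode" == "17000"
        then acc ++ [action] else acc) = (fun acc action => if pvQ2 action = true then acc ++ [action] else acc) from rfl,
      show (fun (acc : List (List (String × String))) (action : List (String × String)) =>
        if pvGet action "type" == "IntroReferral" then acc ++ [action] else acc) = (fun acc action => if pvQ3 action = true then acc ++ [action] else acc) from rfl,
      show (fun (acc : List (List (String × String))) (action : List (String × String)) =>
        if (["Introduced", "Introduction"] : List String).contains (pvGet action "type")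
        then acc ++ [action] else acc) = (fun acc action => if pvQ4 action = true then acc ++ [action] else acc) from rfl,
      show (fun (x : List (String × String)) => pvGet x "actionDate") = pvDate from rfl]
  simp only [PySem.List.foldl_append_if_eq_filter, List.nil_append]
  rw [pvFinalLoop_eq]
  cases hm1 : PySem.List.min? (xs.filter pvQ1) pvDate with
  | some m =>
    have hne : (List.filter pvQ1 xs).isEmpty = false := by
      rcases h : List.filter pvQ1 xs with _ | ⟨c, cs⟩
      · rw [h] at hm1; simp [PySem.List.min?] at hm1
      · simp
    rw [hne]
    simp only [Bool.false_eq_true, if_false, Bool.not_false, if_true]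
    rw [List.headD_eq_head?_getD, pvSortedHead, hm1]
    unfold pvPick
    rw [hm1]
    simp [hne]
  | none =>
    have he1 : List.filter pvQ1 xs = [] := (PySem.List.min?_eq_none_iff _ _).mp hm1
    rw [he1]
    simp only [List.isEmpty_nil, if_true]
    cases hm2 : PySem.List.min? (xs.filter pvQ2) pvDate with
    | some m =>
      have hne : (List.filter pvQ2 xs).isEmpty = false := by
        rcases h : List.filter pvQ2 xs with _ | ⟨c, cs⟩
        · rw [h] at hm2; simp [PySem.List.min?] at hm2
        · simp
      rw [hne]
      simp only [Bool.not_false, if_true]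
      rw [List.headD_eq_head?_getD, pvSortedHead, hm2]
      unfold pvPick
      rw [hm1, hm2]
      simp [hne]
    | none =>
      have he2 : List.filter pvQ2 xs = [] := (PySem.List.min?_eq_none_iff _ _).mp hm2
      rw [he2]
      simp only [List.isEmpty_nil, Bool.not_true, Bool.false_eq_true, if_false]
      cases hm3 : PySem.List.min? (xs.filter pvQ3) pvDate with
      | some m =>
        have hne : (List.filter pvQ3 xs).isEmpty = false := by
          rcases h : List.filter pvQ3 xs with _ | ⟨c, cs⟩
          · rw [h] at hm3; simp [PySem.List.min?] at hm3
          · simp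
        rw [hne]
        simp only [Bool.not_false, if_true]
        rw [List.headD_eq_head?_getD, pvSortedHead, hm3]
        unfold pvPick
        rw [hm1, hm2, hm3]
        simp [hne]
      | none =>
        have he3 : List.filter pvQ3 xs = [] := (PySem.List.min?_eq_none_iff _ _).mp hm3
        rw [he3]
        simp only [List.isEmpty_nil, Bool.not_true, Bool.false_eq_true, if_false]
        cases hm4 : PySem.List.min? (xs.filter pvQ4) pvDate with
        | some m =>
          have hne : (List.filter pvQ4 xs).isEmpty = false := by
            rcases h : List.filter pvQ4 xs with _ | ⟨c, cs⟩
            · rw [h] at hm4; simp [PySem.List.min?] at hm4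
            · simp
          rw [hne]
          simp only [Bool.not_false, if_true]
          rw [List.headD_eq_head?_getD, pvSortedHead, hm4]
          unfold pvPick
          rw [hm1, hm2, hm3, hm4]
          simp [hne]
        | none =>
          have he4 : List.filter pvQ4 xs = [] := (PySem.List.min?_eq_none_iff _ _).mp hm4
          rw [he4]
          simp only [List.isEmpty_nil, Bool.not_true, Bool.false_eq_true, if_false]
          unfold pvPick
          rw [hm1, hm2, hm3, hm4]
          cases hf : xs.find? pvQ5 with
          | some a => rfl
          | none => rfl

-- ===== VERDICT (by name: the statement is the Claim_ definition above) =====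
theorem find_introduction_action_spec : Claim_equal_find_introduction_action := by
  intro actions _
  unfold Spec_find_introduction_action
  rw [pvA_eq_pick, pvB_eq_pick]
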